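-- pv_equiv track=rewrite | github.com/whatasame/BaekjoonHub | 백준/Platinum/5446. 용량 부족/용량 부족.py | solution
-- ===== SOURCE A (Python) =====
-- def solution(cases):
--     answer = []
--     for targets, skips in cases:
--         trie = {}
--         for skip in skips:
--             add(trie, skip)
--         if not trie:
--             answer.append(1)
--             continue
--
--         commands = set()
--         for target in targets:
--             idx = examine(trie, target, 0)
--             if idx == -1:  # no wildcard
--                 commands.add(target)
--             else:
--                 commands.add(target[:idx + 1] + "*")
--
--         answer.append(len(commands))
--
--     return answer
--
-- def add(trie, string):
--     if not string:
--         return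
--
--     if string[0] not in trie:
--         trie[string[0]] = {}
--
--     add(trie[string[0]], string[1:])
--
-- def examine(trie, string, idx):
--     if idx >= len(string):
--         return -1
--
--     if string[idx] in trie:
--         return examine(trie[string[idx]], string, idx + 1)
--     else:
--         return idx
-- ===== SOURCE B (Python) =====
-- def solution(cases):
--     answer = []
--     for targets, skips in cases:
--         if all(len(s) == 0 for s in skips):
--             answer.append(1)
--             continue
--         commands = set()
--         for target in targets:
--             m = 0
--             for s in skips:
--                 m = max(m, _cpl(target, s))
--             if m == len(target):
--                 commands.add(target)
--             else:
--                 commands.add(target[:m + 1] + "*")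
--         answer.append(len(commands))
--     return answer
--
--
-- def _cpl(a, b):
--     i = 0
--     while i < len(a) and i < len(b) and a[i] == b[i]:
--         i += 1
--     return i
-- ===== Notes on version B (the rewrite author's own statement) =====
-- stated objective: simpler
-- what changed: Replaces the trie (build from all skip strings, then per-target traversal) with direct per-target scans: the wildcard position is the maximum common-prefix length of the target with each skip string, and the 'all skips empty' test replaces the empty-trie check.
import Mathlib
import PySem

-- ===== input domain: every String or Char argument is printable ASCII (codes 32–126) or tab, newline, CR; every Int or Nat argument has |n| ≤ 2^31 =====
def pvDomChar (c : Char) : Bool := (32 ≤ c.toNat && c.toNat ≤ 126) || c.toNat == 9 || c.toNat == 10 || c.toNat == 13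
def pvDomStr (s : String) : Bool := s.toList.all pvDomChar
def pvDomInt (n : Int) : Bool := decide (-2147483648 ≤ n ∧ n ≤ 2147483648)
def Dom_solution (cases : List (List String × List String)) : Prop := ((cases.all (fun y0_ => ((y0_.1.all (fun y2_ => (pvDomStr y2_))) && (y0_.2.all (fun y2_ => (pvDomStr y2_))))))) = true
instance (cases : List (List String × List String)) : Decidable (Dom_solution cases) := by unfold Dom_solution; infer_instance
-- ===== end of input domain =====

-- B drops A's trie: per target it takes the maximum common-prefix length with the skip strings by
-- direct scans (objective: simpler — no trie data structure). Return-value equivalence only.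

-- ===== PORT A =====
-- Python dicts of dicts become a mutual trie pair (association list of children, insertion order kept).
mutual
inductive PTrie where
  | mk : PTrieL → PTrie
deriving DecidableEq, Repr
inductive PTrieL where
  | nil : PTrieL
  | cons : Char → PTrie → PTrieL → PTrieL
deriving DecidableEq, Repr
end

-- dict lookup (first match) and dict assignment (overwrite in place, new key appended at end)
def ptGet? : PTrieL → Char → Option PTrie
  | .nil, _ => none
  | .cons c' t l, c => if c' = c then some t else ptGet? l c

def ptSet : PTrieL → Char → PTrie → PTrieL
  | .nil, c, v => .cons c v .nil
  | .cons c' t l, c, v => if c' = c then .cons c' v l else .cons c' t (ptSet l c v)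

-- add(trie, string): Python mutates trie[string[0]] in place; functionally: recurse into the
-- (possibly fresh) child and write it back.
def trieAdd : PTrie → List Char → PTrie
  | t, [] => t
  | .mk l, c :: cs => .mk (ptSet l c (trieAdd ((ptGet? l c).getD (.mk .nil)) cs))

-- examine(trie, string, idx): idx is 0-based and only ever incremented, so Nat; result is Python int.
def examineT (t : PTrie) (s : List Char) (idx : Nat) : Int :=
  if h : s.length ≤ idx then -1
  else
    match t with
    | .mk l =>
      match ptGet? l (s[idx]'(by omega)) with
      | some t' => examineT t' s (idx + 1)
      | none => (idx : Int)
termination_by s.length - idx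

-- 'if not trie'
def ptIsNil : PTrie → Bool
  | .mk .nil => true
  | .mk (.cons _ _ _) => false

-- the body of A's 'for targets, skips in cases' loop
def stepA (answer : List Int) (case_ : List String × List String) : List Int :=
  let targets := case_.1
  let skips := case_.2
  let trie := skips.foldl (fun t sk => trieAdd t sk.toList) (PTrie.mk .nil)
  if ptIsNil trie then answer ++ [1]
  else
    let commands := targets.foldl (fun (cmds : PySem.Set String) target =>
      let idx : Int := examineT trie target.toList 0
      if idx = -1 then PySem.Set.add cmds target
      else PySem.Set.add cmds
        (String.ofList (PySem.List.slice target.toList none (some (idx + 1)) ++ ['*'])))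
      PySem.Set.empty
    answer ++ [(PySem.Set.len commands : Int)]

def solution (cases : List (List String × List String)) : List Int :=
  cases.foldl stepA []

-- ===== PORT B =====
-- _cpl(a, b): common-prefix length, the index loop as structural recursion
def cpl : List Char → List Char → Nat
  | a :: as_, b :: bs => if a = b then cpl as_ bs + 1 else 0
  | _, _ => 0

-- the body of B's per-case loop
def stepB (answer : List Int) (case_ : List String × List String) : List Int :=
  let targets := case_.1
  let skips := case_.2
  if skips.all (fun s => s.toList.length == 0) then answer ++ [1]
  else
    let commands := targets.foldl (fun (cmds : PySem.Set String) target =>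
      let m := skips.foldl (fun m s => max m (cpl target.toList s.toList)) 0
      if m = target.toList.length then PySem.Set.add cmds target
      else PySem.Set.add cmds (String.ofList (target.toList.take (m + 1) ++ ['*'])))
      PySem.Set.empty
    answer ++ [(PySem.Set.len commands : Int)]

def solution_alt (cases : List (List String × List String)) : List Int :=
  cases.foldl stepB []

-- ===== PRECONDITION & SPEC =====
def Spec_solution (cases : List (List String × List String)) (out : List Int) : Prop := out = solution_alt cases
instance (cases : List (List String × List String)) (out : List Int) : Decidable (Spec_solution cases out) := by unfold Spec_solution; infer_instance

-- ===== CLAIM (what is proved, stated in full; the proofs are below) =====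
def Claim_equal_solution : Prop := ∀ (cases : List (List String × List String)), Dom_solution cases → Spec_solution cases (solution cases)

-- ===== LEMMAS AND PROOFS =====

-- length of the longest prefix of cs that is a path in the trie
def walkLen : PTrie → List Char → Nat
  | _, [] => 0
  | .mk l, c :: cs =>
    match ptGet? l c with
    | some t => walkLen t cs + 1
    | none => 0

theorem ptGet?_ptSet : ∀ (l : PTrieL) (b c : Char) (v : PTrie),
    ptGet? (ptSet l b v) c = if b = c then some v else ptGet? l c
  | .nil, b, c, v => by
    simp only [ptSet, ptGet?]
  | .cons c' t l, b, c, v => by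
    simp only [ptSet]
    by_cases h : c' = b
    · subst h
      by_cases h2 : c' = c <;> simp [ptGet?, h2]
    · rw [if_neg h]
      simp only [ptGet?, ptGet?_ptSet l b c v]
      by_cases h2 : c' = c
      · subst h2
        have hbc : ¬ b = c' := fun hh => h (Eq.symm hh)
        simp [hbc]
      · simp [h2]

theorem walkLen_empty (cs : List Char) : walkLen (.mk .nil) cs = 0 := by
  cases cs <;> simp [walkLen, ptGet?]

theorem walkLen_trieAdd (cs : List Char) : ∀ (t : PTrie) (s : List Char),
    walkLen (trieAdd t s) cs = max (walkLen t cs) (cpl cs s) := by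
  induction cs with
  | nil =>
    intro t s
    cases s <;> simp [walkLen, cpl]
  | cons c cs' ih =>
    intro t s
    cases s with
    | nil => simp [trieAdd, cpl]
    | cons b bs =>
      cases t with
      | mk l =>
        simp only [trieAdd, walkLen, ptGet?_ptSet]
        by_cases hbc : b = c
        · subst hbc
          cases hg : ptGet? l b with
          | none => simp [cpl, ih, walkLen_empty]
          | some t' => simp [cpl, ih]
        · have hcb : ¬ c = b := fun hh => hbc (Eq.symm hh)
          simp only [if_neg hbc, cpl, if_neg hcb]
          cases hg : ptGet? l c <;> simp

theorem walkLen_foldl (cs : List Char) : ∀ (skips : List String) (t : PTrie),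
    walkLen (skips.foldl (fun t sk => trieAdd t sk.toList) t) cs
      = skips.foldl (fun m s => max m (cpl cs s.toList)) (walkLen t cs) := by
  intro skips
  induction skips with
  | nil => intro t; rfl
  | cons s ss ih => intro t; simp only [List.foldl_cons, ih, walkLen_trieAdd]

theorem ptIsNil_trieAdd (t : PTrie) (s : List Char) :
    ptIsNil (trieAdd t s) = (ptIsNil t && s.isEmpty) := by
  cases s with
  | nil => simp [trieAdd]
  | cons c cs =>
    cases t with
    | mk l =>
      cases l with
      | nil => simp [trieAdd, ptSet, ptIsNil]
      | cons c' t' l' =>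
        simp only [trieAdd, ptSet]
        split <;> simp [ptIsNil]

theorem ptIsNil_foldl : ∀ (skips : List String) (t : PTrie),
    ptIsNil (skips.foldl (fun t sk => trieAdd t sk.toList) t)
      = (ptIsNil t && skips.all (fun s => s.toList.length == 0)) := by
  intro skips
  induction skips with
  | nil => intro t; simp
  | cons s ss ih =>
    intro t
    have hb : s.toList.isEmpty = (s.toList.length == 0) := by
      cases s.toList <;> simp
    simp only [List.foldl_cons, ih, ptIsNil_trieAdd, List.all_cons, hb, Bool.and_assoc]

theorem examineT_eq (t : PTrie) (s : List Char) (idx : Nat) :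
    examineT t s idx =
      if walkLen t (s.drop idx) = s.length - idx then -1
      else ((idx : Int) + (walkLen t (s.drop idx) : Int)) := by
  fun_induction examineT t s idx with
  | case1 t idx h =>
    have hd : s.drop idx = [] := List.drop_eq_nil_of_le h
    simp [hd, walkLen, Nat.sub_eq_zero_of_le h]
  | case2 idx h l t' hg ih =>
    have hlt : idx < s.length := by omega
    have hdrop : s.drop idx = s[idx] :: s.drop (idx + 1) := List.drop_eq_getElem_cons hlt
    rw [ih, hdrop]
    simp only [walkLen, hg]
    split_ifs <;> push_cast <;> omega
  | case3 idx h l hg =>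
    have hlt : idx < s.length := by omega
    have hdrop : s.drop idx = s[idx] :: s.drop (idx + 1) := List.drop_eq_getElem_cons hlt
    rw [hdrop]
    simp only [walkLen, hg]
    have : ¬ (0 = s.length - idx) := by omega
    simp [this]

theorem stepA_eq_stepB : stepA = stepB := by
  funext answer case_
  obtain ⟨targets, skips⟩ := case_
  unfold stepA stepB
  simp only [ptIsNil_foldl]
  have h0 : ptIsNil (.mk .nil) = true := rfl
  rw [h0, Bool.true_and]
  by_cases hempty : (skips.all (fun s => s.toList.length == 0)) = true
  · rw [if_pos hempty, if_pos hempty]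
  · rw [if_neg hempty, if_neg hempty]
    have hfun : (fun (cmds : PySem.Set String) target =>
        let idx : Int := examineT (skips.foldl (fun t sk => trieAdd t sk.toList) (PTrie.mk .nil)) target.toList 0
        if idx = -1 then PySem.Set.add cmds target
        else PySem.Set.add cmds
          (String.ofList (PySem.List.slice target.toList none (some (idx + 1)) ++ ['*'])))
      = (fun (cmds : PySem.Set String) target =>
        let m := skips.foldl (fun m s => max m (cpl target.toList s.toList)) 0
        if m = target.toList.length then PySem.Set.add cmds target
        else PySem.Set.add cmds (String.ofList (target.toList.take (m + 1) ++ ['*']))) := by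
      funext cmds target
      simp only
      set cs := target.toList with hcs
      set M := skips.foldl (fun m s => max m (cpl cs s.toList)) 0 with hMdef
      have hM : examineT (skips.foldl (fun t sk => trieAdd t sk.toList) (PTrie.mk .nil)) cs 0
          = (if M = cs.length then (-1 : Int) else ((M : Nat) : Int)) := by
        rw [examineT_eq]
        rw [List.drop_zero, walkLen_foldl cs skips (PTrie.mk .nil), walkLen_empty]
        simp [hMdef]
      rw [hM]
      by_cases hlen : M = cs.length
      · rw [if_pos hlen, if_pos rfl, if_pos hlen]
      · rw [if_neg hlen]
        have h1 : ¬ ((M : Int) = -1) := by omega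
        rw [if_neg h1, if_neg hlen]
        have h2 : ((M : Int) + 1) = (((M + 1 : Nat) : Int)) := by push_cast; ring
        rw [h2, PySem.List.slice_to_natCast]
    rw [hfun]

-- ===== VERDICT (by name: the statement is the Claim_ definition above) =====
theorem solution_spec : Claim_equal_solution := by
  intro cases _
  unfold Spec_solution solution solution_alt
  rw [stepA_eq_stepB]
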